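-- pv_equiv track=rewrite | github.com/danielrfry/notesalad-tools | notesaladtools/opl.py | get_op_reg_offsets
-- ===== SOURCE A (Python) =====
-- def get_op_reg_offsets(ch, op4=False):
--     if op4:
--         ch1 = ((ch // 3) * 9) + (ch % 3)
--         ch2 = ch1 + 3
--         return (*get_op_reg_offsets(ch1), *get_op_reg_offsets(ch2))
--
--     reg_base = 0x100 if ch >= 9 else 0
--     ch = ch % 9
--     reg_base = reg_base + ((ch // 3) * 8) + (ch % 3)
--     return (reg_base, reg_base + 3)
-- ===== SOURCE B (Python) =====
-- OFFS = [0, 1, 2, 8, 9, 10, 16, 17, 18]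
--
--
-- def get_op_reg_offsets(ch, op4=False):
--     if op4:
--         ch1 = (ch // 3) * 9 + (ch % 3)
--         res = []
--         for c in (ch1, ch1 + 3):
--             base = (0x100 if c >= 9 else 0) + OFFS[c % 9]
--             res += [base, base + 3]
--         return tuple(res)
--     base = (0x100 if ch >= 9 else 0) + OFFS[ch % 9]
--     return (base, base + 3)
-- ===== Notes on version B (the rewrite author's own statement) =====
-- stated objective: simpler
-- what changed: Replaces the per-channel (//3)*8 + %3 arithmetic with a fixed 9-entry offset table indexed by ch % 9, and replaces the two recursive calls in the op4 case with a loop over the two derived channels that accumulates each channel's (base, base+3) pair.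
import Mathlib
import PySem

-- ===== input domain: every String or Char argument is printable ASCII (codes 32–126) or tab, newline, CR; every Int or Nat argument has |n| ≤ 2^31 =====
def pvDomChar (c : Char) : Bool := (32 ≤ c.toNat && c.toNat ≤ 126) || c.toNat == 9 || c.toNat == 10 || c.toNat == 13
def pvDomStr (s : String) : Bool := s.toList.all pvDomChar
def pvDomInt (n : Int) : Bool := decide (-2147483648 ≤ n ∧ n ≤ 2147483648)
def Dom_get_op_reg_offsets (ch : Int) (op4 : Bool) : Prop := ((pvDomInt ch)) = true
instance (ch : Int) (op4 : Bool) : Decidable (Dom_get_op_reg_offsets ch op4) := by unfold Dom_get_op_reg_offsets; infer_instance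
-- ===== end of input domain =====

-- B replaces A's per-channel offset arithmetic by a fixed 9-entry table and A's
-- two recursive calls (op4 case) by a loop over the two derived channels (simpler).

-- ===== PORT A =====
def get_op_reg_offsets (ch : Int) (op4 : Bool) : List Int :=
  if op4 then
    let ch1 := (PySem.Int.floordiv ch 3) * 9 + PySem.Int.mod ch 3
    let ch2 := ch1 + 3
    get_op_reg_offsets ch1 false ++ get_op_reg_offsets ch2 false
  else
    let reg_base : Int := if ch ≥ 9 then 0x100 else 0
    let ch' := PySem.Int.mod ch 9
    let reg_base' := reg_base + (PySem.Int.floordiv ch' 3) * 8 + PySem.Int.mod ch' 3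
    [reg_base', reg_base' + 3]
termination_by (if op4 then 1 else 0 : Nat)
decreasing_by all_goals simp [*]

-- ===== PORT B =====
def pvOFFS : List Int := [0, 1, 2, 8, 9, 10, 16, 17, 18]

def get_op_reg_offsets_alt (ch : Int) (op4 : Bool) : List Int :=
  if op4 then
    let ch1 := (PySem.Int.floordiv ch 3) * 9 + PySem.Int.mod ch 3
    [ch1, ch1 + 3].foldl (fun res c =>
      let base := (if c ≥ 9 then (0x100 : Int) else 0) + PySem.List.pyGetD pvOFFS (PySem.Int.mod c 9) 0
      res ++ [base, base + 3]) []
  else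
    let base := (if ch ≥ 9 then (0x100 : Int) else 0) + PySem.List.pyGetD pvOFFS (PySem.Int.mod ch 9) 0
    [base, base + 3]

-- ===== PRECONDITION & SPEC =====
def Spec_get_op_reg_offsets (ch : Int) (op4 : Bool) (out : List Int) : Prop := out = get_op_reg_offsets_alt ch op4
instance (ch : Int) (op4 : Bool) (out : List Int) : Decidable (Spec_get_op_reg_offsets ch op4 out) := by unfold Spec_get_op_reg_offsets; infer_instance

-- ===== CLAIM (what is proved, stated in full; the proofs are below) =====
def Claim_equal_get_op_reg_offsets : Prop := ∀ (ch : Int) (op4 : Bool), Dom_get_op_reg_offsets ch op4 → Spec_get_op_reg_offsets ch op4 (get_op_reg_offsets ch op4)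

-- ===== LEMMAS AND PROOFS =====

-- The table entry at ch % 9 is exactly A's (ch%9 // 3)*8 + (ch%9 % 3).
theorem pvOFFS_eq (ch : Int) :
    PySem.List.pyGetD pvOFFS (PySem.Int.mod ch 9) 0
      = (PySem.Int.floordiv (PySem.Int.mod ch 9) 3) * 8 + PySem.Int.mod (PySem.Int.mod ch 9) 3 := by
  have h0 : 0 ≤ PySem.Int.mod ch 9 := PySem.Int.mod_nonneg ch (by omega)
  have h9 : PySem.Int.mod ch 9 < 9 := PySem.Int.mod_lt ch (by omega)
  set r := PySem.Int.mod ch 9 with hr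
  interval_cases r <;> decide

-- The two non-op4 branches agree for every channel.
theorem base_eq (ch : Int) : get_op_reg_offsets ch false = get_op_reg_offsets_alt ch false := by
  rw [get_op_reg_offsets]
  simp only [get_op_reg_offsets_alt, Bool.false_eq_true, if_false, pvOFFS_eq ch]
  ring_nf

-- ===== VERDICT (by name: the statement is the Claim_ definition above) =====
theorem get_op_reg_offsets_spec : Claim_equal_get_op_reg_offsets := by
  intro ch op4 _
  unfold Spec_get_op_reg_offsets
  cases op4 with
  | false => exact base_eq ch
  | true =>
    rw [get_op_reg_offsets]
    simp only [get_op_reg_offsets_alt, List.foldl]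
    rw [base_eq, base_eq]
    simp only [get_op_reg_offsets_alt, Bool.false_eq_true, if_false, List.nil_append]
    rfl
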